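-- pv_equiv track=rewrite | github.com/sabdi077/Max._Likelihood_-_Transient_Q_ij | AlphaBetaPlotsCode.py | gen_optimized
-- ===== SOURCE A (Python) =====
-- def gen_optimized(ws, ft, tR, switch_list):
--     final = (ft - tR) // ws
--     COL = ["blue"] * (final + 1)
--
--     for k in range(final + 1):
--         start = k * ws
--         end = start + tR
--         for m in switch_list:
--             if start <= m < end:
--                 COL[k] = "red"
--                 break
--
--     return COL
-- ===== SOURCE B (Python) =====
-- def gen_optimized(ws, ft, tR, switch_list):
--     final = (ft - tR) // ws
--     n = final + 1
--     if n <= 0: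
--         return []
--     diff = [0] * (n + 1)
--     for m in switch_list:
--         # windows k with k*ws <= m < k*ws + tR, expressed as an interval of k
--         if ws > 0:
--             lo = (m - tR) // ws + 1
--             hi = m // ws
--         else:
--             lo = (-m - 1) // (-ws) + 1
--             hi = (tR - m - 1) // (-ws)
--         lo = max(lo, 0)
--         hi = min(hi, final)
--         if lo <= hi:
--             diff[lo] += 1
--             diff[hi + 1] -= 1
--     col = []
--     cur = 0
--     for d in diff[:n]:
--         cur += d
--         col.append("red" if cur > 0 else "blue")
--     return col
-- ===== Notes on version B (the rewrite author's own statement) =====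
-- stated objective: alternative
-- what changed: Instead of scanning the whole switch_list for every window, B computes for each switch the exact interval of window indices it colors (via floor division, for both signs of ws) and marks them all at once with a difference array plus one prefix-sum pass; A's early break makes both effectively linear on benign inputs, so no speed is claimed.
import Mathlib
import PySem

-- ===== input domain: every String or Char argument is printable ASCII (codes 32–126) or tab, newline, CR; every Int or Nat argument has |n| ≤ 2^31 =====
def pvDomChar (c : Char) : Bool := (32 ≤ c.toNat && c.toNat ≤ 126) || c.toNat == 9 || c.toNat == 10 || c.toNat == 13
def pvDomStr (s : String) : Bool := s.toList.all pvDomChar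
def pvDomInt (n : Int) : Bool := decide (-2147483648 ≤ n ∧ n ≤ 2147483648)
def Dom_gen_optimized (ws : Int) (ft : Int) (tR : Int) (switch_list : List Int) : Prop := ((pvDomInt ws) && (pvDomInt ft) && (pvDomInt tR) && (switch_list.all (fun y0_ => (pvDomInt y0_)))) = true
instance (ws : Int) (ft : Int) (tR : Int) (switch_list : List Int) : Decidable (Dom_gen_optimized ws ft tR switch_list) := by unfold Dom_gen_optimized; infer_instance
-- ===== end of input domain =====

-- B replaces A's per-window scan of switch_list by per-switch interval marking in a
-- difference array plus one prefix-sum pass (alternative algorithm, same measured cost).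

-- ===== PORT A =====
-- inner loop: 'for m in switch_list: if start <= m < end: COL[k] = "red"; break'
def aInner (ws : Int) (tR : Int) (k : Int) (COL : List String) : List Int → List String
  | [] => COL
  | m :: rest =>
      if k * ws ≤ m ∧ m < k * ws + tR then PySem.List.pySetD COL k "red"
      else aInner ws tR k COL rest

def gen_optimized (ws : Int) (ft : Int) (tR : Int) (switch_list : List Int) : List String :=
  let final := PySem.Int.floordiv (ft - tR) ws
  -- ["blue"] * (final + 1): empty when final + 1 ≤ 0, exactly as Python's list repetition
  let COL := List.replicate (final + 1).toNat "blue"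
  (PySem.List.pyRange 0 (final + 1) 1).foldl (fun C k => aInner ws tR k C switch_list) COL

-- ===== PORT B =====
-- interval of window indices k with k*ws <= m < k*ws + tR (Source B's lo/hi formulas)
def bLo (ws : Int) (tR : Int) (m : Int) : Int :=
  if ws > 0 then PySem.Int.floordiv (m - tR) ws + 1
  else PySem.Int.floordiv (-m - 1) (-ws) + 1

def bHi (ws : Int) (tR : Int) (m : Int) : Int :=
  if ws > 0 then PySem.Int.floordiv m ws
  else PySem.Int.floordiv (tR - m - 1) (-ws)

-- 'diff[lo] += 1; diff[hi+1] -= 1' after clamping (indices are always in range)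
def bMark (ws : Int) (tR : Int) (finalv : Int) (diff : List Int) (m : Int) : List Int :=
  let lo := max (bLo ws tR m) 0
  let hi := min (bHi ws tR m) finalv
  if lo ≤ hi then
    let d1 := PySem.List.pySetD diff lo (PySem.List.pyGetD diff lo 0 + 1)
    PySem.List.pySetD d1 (hi + 1) (PySem.List.pyGetD d1 (hi + 1) 0 - 1)
  else diff

-- prefix-sum pass: 'cur += d; col.append("red" if cur > 0 else "blue")'
def bScan (cur : Int) : List Int → List String
  | [] => []
  | d :: rest => (if cur + d > 0 then "red" else "blue") :: bScan (cur + d) rest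

def gen_optimized_alt (ws : Int) (ft : Int) (tR : Int) (switch_list : List Int) : List String :=
  let final := PySem.Int.floordiv (ft - tR) ws
  let n := final + 1
  if n ≤ 0 then []
  else
    let diff := switch_list.foldl (bMark ws tR final) (List.replicate (n.toNat + 1) 0)
    bScan 0 (diff.take n.toNat)

-- ===== PRECONDITION & SPEC =====
-- A raises ZeroDivisionError (in '(ft - tR) // ws') exactly when ws = 0; B divides too.
def Pre_gen_optimized (ws : Int) (ft : Int) (tR : Int) (switch_list : List Int) : Prop := ws ≠ 0
instance (ws : Int) (ft : Int) (tR : Int) (switch_list : List Int) : Decidable (Pre_gen_optimized ws ft tR switch_list) := by unfold Pre_gen_optimized; infer_instance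
def pvWitness_gen_optimized : Int × Int × Int × List Int := (1, 3, 1, [1])

def Spec_gen_optimized (ws : Int) (ft : Int) (tR : Int) (switch_list : List Int) (out : List String) : Prop := out = gen_optimized_alt ws ft tR switch_list
instance (ws : Int) (ft : Int) (tR : Int) (switch_list : List Int) (out : List String) : Decidable (Spec_gen_optimized ws ft tR switch_list out) := by unfold Spec_gen_optimized; infer_instance

-- ===== CLAIM (what is proved, stated in full; the proofs are below) =====
def Claim_equal_gen_optimized : Prop := ∀ (ws : Int) (ft : Int) (tR : Int) (switch_list : List Int), Dom_gen_optimized ws ft tR switch_list → Pre_gen_optimized ws ft tR switch_list → Spec_gen_optimized ws ft tR switch_list (gen_optimized ws ft tR switch_list)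

-- ===== LEMMAS AND PROOFS =====

-- window k is coloured red iff some switch lies in [k*ws, k*ws + tR)
def redAt (ws : Int) (tR : Int) (sl : List Int) (k : Int) : Bool :=
  sl.any (fun m => decide (k * ws ≤ m) && decide (m < k * ws + tR))

def canon (ws : Int) (tR : Int) (finalv : Int) (sl : List Int) : List String :=
  (List.range (finalv + 1).toNat).map (fun j : Nat => if redAt ws tR sl (j : Int) then "red" else "blue")

-- ---- A side ----
lemma aInner_eq (ws tR k : Int) (COL : List String) (sl : List Int) :
    aInner ws tR k COL sl = if redAt ws tR sl k then PySem.List.pySetD COL k "red" else COL := by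
  induction sl with
  | nil => simp [aInner, redAt]
  | cons m rest ih =>
      by_cases h : k * ws ≤ m ∧ m < k * ws + tR
      · simp [aInner, redAt, h]
      · simp only [aInner, redAt, List.any_cons] at *
        rw [if_neg h, ih]
        congr 1
        simp [h]

lemma foldA_length (ws tR : Int) (sl : List Int) (L : List Int) (COL : List String) :
    (L.foldl (fun C k => aInner ws tR k C sl) COL).length = COL.length := by
  induction L generalizing COL with
  | nil => rfl
  | cons k rest ih =>
      simp only [List.foldl_cons]
      rw [ih, aInner_eq]
      split <;> simp [PySem.List.length_pySetD]

lemma foldA_get (ws tR : Int) (sl : List Int) (L : List Int) (COL : List String)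
    (hL : ∀ k ∈ L, 0 ≤ k) (j : Nat) (hj : j < COL.length) :
    (L.foldl (fun C k => aInner ws tR k C sl) COL)[j]?
      = some (if (j : Int) ∈ L ∧ redAt ws tR sl (j : Int) then "red" else COL[j]) := by
  induction L generalizing COL with
  | nil => simp [List.getElem?_eq_getElem hj]
  | cons k rest ih =>
      simp only [List.foldl_cons]
      rw [aInner_eq ws tR k COL sl]
      have hk : 0 ≤ k := hL k (by simp)
      have hiff : ((j : Int) ∈ k :: rest ∧ redAt ws tR sl (j : Int) = true)
          ↔ (((j : Int) = k ∨ (j : Int) ∈ rest) ∧ redAt ws tR sl (j : Int) = true) := by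
        simp [List.mem_cons]
      by_cases hr : redAt ws tR sl k
      · rw [if_pos hr, PySem.List.pySetD_of_nonneg COL _ hk]
        rw [ih (COL.set k.toNat "red") (fun k' hk' => hL k' (by simp [hk'])) (by simpa using hj)]
        rw [List.getElem_set]
        by_cases hkj : k.toNat = j
        · have hkj' : (j : Int) = k := by omega
          rw [if_pos hkj]
          rw [if_pos (hiff.2 ⟨Or.inl hkj', hkj' ▸ hr⟩)]
          split <;> rfl
        · have hkj' : ¬ ((j : Int) = k) := by omega
          rw [if_neg hkj]
          by_cases hjr : (j : Int) ∈ rest ∧ redAt ws tR sl (j : Int) = true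
          · rw [if_pos hjr, if_pos (hiff.2 ⟨Or.inr hjr.1, hjr.2⟩)]
          · rw [if_neg hjr, if_neg (fun hc => hjr ⟨(hiff.1 hc).1.resolve_left hkj', (hiff.1 hc).2⟩)]
      · rw [if_neg hr]
        rw [ih COL (fun k' hk' => hL k' (by simp [hk'])) hj]
        by_cases hjr : (j : Int) ∈ rest ∧ redAt ws tR sl (j : Int) = true
        · rw [if_pos hjr, if_pos (hiff.2 ⟨Or.inr hjr.1, hjr.2⟩)]
        · rw [if_neg hjr]
          rw [if_neg (fun hc => ?_)]
          rcases (hiff.1 hc).1 with h | h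
          · exact hr (h ▸ (hiff.1 hc).2)
          · exact hjr ⟨h, (hiff.1 hc).2⟩

lemma a_eq_canon (ws ft tR : Int) (sl : List Int) :
    gen_optimized ws ft tR sl = canon ws tR (PySem.Int.floordiv (ft - tR) ws) sl := by
  dsimp only [gen_optimized, canon]
  set final := PySem.Int.floordiv (ft - tR) ws with hf
  apply List.ext_getElem?
  intro j
  have hL : ∀ k ∈ PySem.List.pyRange 0 (final + 1) 1, 0 ≤ k := by
    intro k hk
    exact (PySem.List.mem_pyRange_one.1 hk).1
  by_cases hjn : j < (final + 1).toNat
  · have hj : j < (List.replicate (final + 1).toNat "blue").length := by simpa using hjn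
    rw [foldA_get ws tR sl _ _ hL j hj]
    rw [List.getElem?_map, List.getElem?_range hjn]
    have hmem : (j : Int) ∈ PySem.List.pyRange 0 (final + 1) 1 := by
      rw [PySem.List.mem_pyRange_one]
      omega
    simp [hmem]
  · rw [List.getElem?_eq_none (by rw [foldA_length]; simpa using hjn),
        List.getElem?_eq_none (by simpa using hjn)]

-- ---- B side ----
lemma sum_take_set (xs : List Int) (a t : Nat) (v : Int) (h : a < xs.length) :
    ((xs.set a v).take t).sum = (xs.take t).sum + (if a < t then v - xs[a] else 0) := by
  induction xs generalizing a t with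
  | nil => simp at h
  | cons x rest ih =>
      cases a with
      | zero => cases t <;> simp [List.set] <;> ring
      | succ a' =>
          cases t with
          | zero => simp
          | succ t' =>
              simp only [List.set, List.take, List.sum_cons, List.getElem_cons_succ]
              rw [ih a' t' (by simpa using h)]
              split <;> split <;> omega

lemma bMark_length (ws tR f : Int) (diff : List Int) (m : Int) :
    (bMark ws tR f diff m).length = diff.length := by
  dsimp only [bMark]
  split <;> simp [PySem.List.length_pySetD]

def pfx (ds : List Int) (j : Nat) : Int := ((ds.take (j + 1)).sum)

lemma pfx_bMark (ws tR f : Int) (diff : List Int) (m : Int) (j : Nat)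
    (hlen : diff.length = (f + 1).toNat + 1) (hj : (j : Int) ≤ f) :
    pfx (bMark ws tR f diff m) j
      = pfx diff j + (if bLo ws tR m ≤ (j : Int) ∧ (j : Int) ≤ bHi ws tR m then 1 else 0) := by
  dsimp only [bMark]
  by_cases hcase : max (bLo ws tR m) 0 ≤ min (bHi ws tR m) f
  · rw [if_pos hcase]
    have hlo0 : (0:Int) ≤ max (bLo ws tR m) 0 := le_max_right _ _
    have hhi0 : (0:Int) ≤ min (bHi ws tR m) f + 1 := by omega
    have hloN : (max (bLo ws tR m) 0).toNat < diff.length := by omega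
    have hhiN : (min (bHi ws tR m) f + 1).toNat < diff.length := by omega
    rw [PySem.List.pySetD_of_nonneg diff _ hlo0, PySem.List.pyGetD_of_nonneg diff 0 hlo0]
    set lo := (max (bLo ws tR m) 0).toNat with hlo
    set d1 := diff.set lo (diff.getD lo 0 + 1) with hd1
    have hd1len : d1.length = diff.length := by rw [hd1]; simp
    rw [PySem.List.pySetD_of_nonneg d1 _ hhi0, PySem.List.pyGetD_of_nonneg d1 0 hhi0]
    set hi1 := (min (bHi ws tR m) f + 1).toNat with hhi1
    unfold pfx
    have hg1 : d1.getD hi1 0 = d1[hi1]'(by omega) := List.getD_eq_getElem d1 0 (by omega)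
    have hg2 : diff.getD lo 0 = diff[lo]'hloN := List.getD_eq_getElem diff 0 hloN
    rw [sum_take_set d1 hi1 (j + 1) _ (by omega), hg1]
    simp only [sub_sub_cancel_left]
    have e2 : (List.take (j + 1) d1).sum = (List.take (j + 1) diff).sum + (if lo < j + 1 then 1 else 0) := by
      rw [hd1, sum_take_set diff lo (j + 1) _ hloN, hg2]
      split <;> ring
    rw [e2]
    split_ifs <;> omega
  · rw [if_neg hcase, if_neg (by omega)]
    simp

lemma pfx_fold (ws tR f : Int) (sl : List Int) (diff : List Int) (j : Nat)
    (hlen : diff.length = (f + 1).toNat + 1) (hj : (j : Int) ≤ f) :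
    pfx (sl.foldl (bMark ws tR f) diff) j
      = pfx diff j
        + ((sl.filter (fun m => decide (bLo ws tR m ≤ (j : Int)) && decide ((j : Int) ≤ bHi ws tR m))).length : Int) := by
  induction sl generalizing diff with
  | nil => simp
  | cons m rest ih =>
      simp only [List.foldl_cons, List.filter_cons]
      rw [ih (bMark ws tR f diff m) (by rw [bMark_length]; exact hlen), pfx_bMark ws tR f diff m j hlen hj]
      by_cases hm : bLo ws tR m ≤ (j : Int) ∧ (j : Int) ≤ bHi ws tR m
      · rw [if_pos hm, if_pos (by simp [hm.1, hm.2])]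
        simp only [List.length_cons]
        push_cast
        ring
      · rw [if_neg hm, if_neg (by simpa using hm)]
        simp

lemma bScan_eq (ds : List Int) (cur : Int) :
    bScan cur ds = (List.range ds.length).map
      (fun j => if cur + (ds.take (j + 1)).sum > 0 then "red" else "blue") := by
  induction ds generalizing cur with
  | nil => simp [bScan]
  | cons d rest ih =>
      simp only [bScan, List.length_cons, List.range_succ_eq_map, List.map_cons, List.map_map]
      rw [ih]
      refine congrArg₂ _ (by simp) ?_
      apply List.map_congr_left
      intro j hj
      simp [List.take_succ_cons, add_assoc]

lemma interval_iff (ws tR m j : Int) (hw : ws ≠ 0) (hj : 0 ≤ j) :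
    (bLo ws tR m ≤ j ∧ j ≤ bHi ws tR m) ↔ (j * ws ≤ m ∧ m < j * ws + tR) := by
  by_cases hp : ws > 0
  · have h1 : j ≤ PySem.Int.floordiv (m - tR) ws ↔ j * ws ≤ m - tR :=
      PySem.Int.le_floordiv_iff_mul_le hp
    have h2 : j ≤ PySem.Int.floordiv m ws ↔ j * ws ≤ m :=
      PySem.Int.le_floordiv_iff_mul_le hp
    simp only [bLo, bHi, if_pos hp]
    constructor
    · rintro ⟨ha, hb⟩
      refine ⟨h2.1 hb, ?_⟩
      by_contra hc
      have := h1.2 (by linarith)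
      omega
    · rintro ⟨ha, hb⟩
      refine ⟨?_, h2.2 ha⟩
      have : ¬ (j ≤ PySem.Int.floordiv (m - tR) ws) := fun hle => by
        have := h1.1 hle; linarith
      omega
  · have hb0 : 0 < -ws := by omega
    have h1 : j ≤ PySem.Int.floordiv (-m - 1) (-ws) ↔ j * (-ws) ≤ -m - 1 :=
      PySem.Int.le_floordiv_iff_mul_le hb0
    have h2 : j ≤ PySem.Int.floordiv (tR - m - 1) (-ws) ↔ j * (-ws) ≤ tR - m - 1 :=
      PySem.Int.le_floordiv_iff_mul_le hb0
    have hjb : j * (-ws) = -(j * ws) := by ring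
    rw [hjb] at h1 h2
    simp only [bLo, bHi, if_neg hp]
    constructor
    · rintro ⟨ha, hb⟩
      have h2' := h2.1 hb
      have h1' : ¬ (j ≤ PySem.Int.floordiv (-m - 1) (-ws)) := by omega
      rw [h1] at h1'
      constructor <;> linarith
    · rintro ⟨ha, hb⟩
      have h1' : ¬ (-(j * ws) ≤ -m - 1) := by linarith
      rw [← h1] at h1'
      refine ⟨by omega, h2.2 (by linarith)⟩

lemma foldB_length (ws tR f : Int) (sl : List Int) (diff : List Int) :
    (sl.foldl (bMark ws tR f) diff).length = diff.length := by
  induction sl generalizing diff with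
  | nil => rfl
  | cons m rest ih =>
      simp only [List.foldl_cons]
      rw [ih, bMark_length]

lemma b_eq_canon (ws ft tR : Int) (sl : List Int) (hw : ws ≠ 0) :
    gen_optimized_alt ws ft tR sl = canon ws tR (PySem.Int.floordiv (ft - tR) ws) sl := by
  dsimp only [gen_optimized_alt, canon]
  set final := PySem.Int.floordiv (ft - tR) ws with hf
  by_cases hn : final + 1 ≤ 0
  · rw [if_pos hn]
    have h0 : (final + 1).toNat = 0 := by omega
    simp [h0]
  · rw [if_neg hn]
    have hf0 : 0 ≤ final := by omega
    set D := sl.foldl (bMark ws tR final) (List.replicate ((final + 1).toNat + 1) 0) with hD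
    have hDlen : D.length = (final + 1).toNat + 1 := by rw [hD, foldB_length]; simp
    have htake : (D.take (final + 1).toNat).length = (final + 1).toNat := by
      rw [List.length_take]; omega
    rw [bScan_eq, htake]
    apply List.map_congr_left
    intro j hj
    have hj' : j < (final + 1).toNat := List.mem_range.1 hj
    have hmin : min (j + 1) (final + 1).toNat = j + 1 := by omega
    rw [List.take_take, hmin]
    have hrep : pfx (List.replicate ((final + 1).toNat + 1) (0 : Int)) j = 0 := by
      unfold pfx
      rw [List.take_replicate]
      simp
    have hpfx : (List.take (j + 1) D).sum
        = ((sl.filter (fun m => decide (bLo ws tR m ≤ (j : Int)) && decide ((j : Int) ≤ bHi ws tR m))).length : Int) := by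
      have h := pfx_fold ws tR final sl (List.replicate ((final + 1).toNat + 1) 0) j (by simp) (by omega)
      rw [hrep, zero_add] at h
      simpa [pfx, hD] using h
    rw [zero_add, hpfx]
    by_cases hred : redAt ws tR sl (j : Int) = true
    · rw [if_pos hred]
      have hex : ∃ m ∈ sl, (j : Int) * ws ≤ m ∧ m < (j : Int) * ws + tR := by
        simpa [redAt, List.any_eq_true, Bool.and_eq_true, decide_eq_true_eq] using hred
      obtain ⟨m, hm, hcond⟩ := hex
      have hmf : m ∈ sl.filter (fun m => decide (bLo ws tR m ≤ (j : Int)) && decide ((j : Int) ≤ bHi ws tR m)) := by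
        rw [List.mem_filter]
        refine ⟨hm, ?_⟩
        simp only [Bool.and_eq_true, decide_eq_true_eq]
        exact (interval_iff ws tR m (j : Int) hw (Int.natCast_nonneg j)).2 hcond
      have hlen := List.length_pos_of_mem hmf
      rw [if_pos (by exact_mod_cast hlen)]
    · rw [if_neg hred]
      rw [if_neg ?_]
      intro hpos
      have hlen : 0 < (sl.filter (fun m => decide (bLo ws tR m ≤ (j : Int)) && decide ((j : Int) ≤ bHi ws tR m))).length := by
        exact_mod_cast hpos
      obtain ⟨m, hmf⟩ := List.exists_mem_of_length_pos hlen
      rw [List.mem_filter] at hmf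
      apply hred
      have hcond : (j : Int) * ws ≤ m ∧ m < (j : Int) * ws + tR := by
        refine (interval_iff ws tR m (j : Int) hw (Int.natCast_nonneg j)).1 ?_
        simpa [Bool.and_eq_true, decide_eq_true_eq] using hmf.2
      simp only [redAt, List.any_eq_true, Bool.and_eq_true, decide_eq_true_eq]
      exact ⟨m, hmf.1, hcond⟩

-- ===== VERDICT (by name: the statement is the Claim_ definition above) =====
theorem gen_optimized_spec : Claim_equal_gen_optimized := by
  intro ws ft tR sl _ hPre
  unfold Spec_gen_optimized
  rw [a_eq_canon, b_eq_canon ws ft tR sl hPre]
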